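-- pv_equiv track=rewrite | github.com/AlexMontgomerie/fpgaconvnet-optimiser | fpgaconvnet_optimiser/tools/hls_helper.py | stable_array_rsc
-- ===== SOURCE A (Python) =====
-- import math
--
-- def bram18k_depth(data_width):
--     if data_width == 1:
--         return 16384
--     elif data_width == 2:
--         return 8192
--     elif data_width <= 4:
--         return 4096
--     elif data_width <= 9:
--         return 2048
--     elif data_width <= 18:
--         return 1024
--     elif data_width <= 36:
--         return 512
--     else:
--         assert False, "Unreachable"
--
-- def stable_array_rsc(data_width, array_size, resource_type=None):
--     if data_width*array_size >= 1024:
--         resource_type = "BRAM"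
--
--     array_bram = 0
--     array_lut = 0
--     if resource_type == "BRAM":
--         max_bram_depth = bram18k_depth(min(data_width,36))
--         array_bram = math.ceil(data_width/36)
--
--         # this while loop is based on hls behaviour, vivado may decide to use more BRAMs to avoid large multiplexer
--         while array_size > max_bram_depth:
--             array_size = math.ceil(array_size/2)
--             array_bram = int(array_bram*2)
--     else:
--         array_lut = math.ceil(data_width*array_size/64)
--
--     return {
--         "LUT"  : array_lut,
--         "BRAM" : array_bram,
--         "DSP"  : 0,
--         "FF"   : 0,
--     }
-- ===== SOURCE B (Python) =====
-- def stable_array_rsc(data_width, array_size, resource_type=None):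
--     if data_width * array_size >= 1024:
--         resource_type = "BRAM"
--     array_bram = 0
--     array_lut = 0
--     if resource_type == "BRAM":
--         w = min(data_width, 36)
--         if w == 1:
--             max_bram_depth = 16384
--         elif w == 2:
--             max_bram_depth = 8192
--         elif w <= 4:
--             max_bram_depth = 4096
--         elif w <= 9:
--             max_bram_depth = 2048
--         elif w <= 18:
--             max_bram_depth = 1024
--         else:
--             max_bram_depth = 512
--         # closed form for the repeated ceil-halving: smallest k with array_size <= depth*2**k
--         m = -(-array_size // max_bram_depth)
--         k = 0 if m <= 1 else (m - 1).bit_length()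
--         array_bram = -(-data_width // 36) * 2 ** k
--     else:
--         array_lut = -(-(data_width * array_size) // 64)
--     return {"LUT": array_lut, "BRAM": array_bram, "DSP": 0, "FF": 0}
-- ===== Notes on version B (the rewrite author's own statement) =====
-- stated objective: alternative
-- what changed: The while loop that repeatedly ceil-halves array_size (doubling array_bram) is replaced by a closed form: m = ceildiv(array_size, max_bram_depth) and array_bram *= 2**((m-1).bit_length()) (0 if m<=1), the smallest k with max_bram_depth*2^k >= array_size; the bram18k depth chain and the LUT branch keep their structure with exact integer ceiling division.
import Mathlib
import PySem

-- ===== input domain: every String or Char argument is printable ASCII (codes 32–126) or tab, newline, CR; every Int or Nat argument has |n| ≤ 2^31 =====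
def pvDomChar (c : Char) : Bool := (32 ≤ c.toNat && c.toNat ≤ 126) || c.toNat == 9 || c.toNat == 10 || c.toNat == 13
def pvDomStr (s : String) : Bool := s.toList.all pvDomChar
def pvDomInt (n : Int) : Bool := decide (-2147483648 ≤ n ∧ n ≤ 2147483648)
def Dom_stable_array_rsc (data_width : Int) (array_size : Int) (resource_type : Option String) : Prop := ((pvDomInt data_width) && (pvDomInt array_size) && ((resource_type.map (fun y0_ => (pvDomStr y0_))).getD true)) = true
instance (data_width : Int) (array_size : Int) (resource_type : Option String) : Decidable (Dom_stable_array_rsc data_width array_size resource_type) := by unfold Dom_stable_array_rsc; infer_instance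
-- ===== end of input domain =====

-- B replaces A's ceil-halving while loop by a closed-form bit_length count of the doublings; return values only.


-- ===== PORT A =====
-- bram18k_depth; the final Python branch is `assert False` (unreachable: the only call
-- passes min(data_width, 36) ≤ 36), so the `data_width <= 36` branch is the last one here.
def bram18k_depth (data_width : Int) : Int :=
  if data_width = 1 then 16384
  else if data_width = 2 then 8192
  else if data_width ≤ 4 then 4096
  else if data_width ≤ 9 then 2048
  else if data_width ≤ 18 then 1024
  else 512

-- termination helper for the while loop (cited by pvALoop's decreasing_by)
theorem pvCeilHalf_bounds (as : Int) (h : 2 ≤ as) :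
    1 ≤ -(PySem.Int.floordiv (-as) 2) ∧ -(PySem.Int.floordiv (-as) 2) < as := by
  rw [PySem.Int.floordiv_eq_ediv_of_pos (by norm_num)]
  omega

theorem bram18k_depth_pos (x : Int) : 0 < bram18k_depth x := by
  unfold bram18k_depth; split_ifs <;> norm_num

-- the `while array_size > max_bram_depth` loop; math.ceil(array_size/2) is exact on |array_size| ≤ 2^31
-- and ported as the integer ceiling -((-array_size) // 2)
def pvALoop (d : Int) (hd : 0 < d) (array_size array_bram : Int) : Int :=
  if array_size > d then
    pvALoop d hd (-(PySem.Int.floordiv (-array_size) 2)) (array_bram * 2)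
  else array_bram
termination_by array_size.toNat
decreasing_by
  have := pvCeilHalf_bounds array_size (by omega)
  omega

-- hand port of math.ceil(x/64) where x = data_width*array_size is a Python int and x/64 is
-- binary64 float division: exact when |x| < 2^53 (the quotient is representable), otherwise
-- round-to-nearest-even at 53 significant bits, then ceiling (validated against CPython)
def pvFloatCeilDiv64 (x : Int) : Int :=
  if PySem.Int.bitLength x ≤ 53 then -(PySem.Int.floordiv (-x) 64)
  else
    let s := PySem.Int.bitLength x - 53
    let q := PySem.Int.floordiv x (2 ^ s)
    let r := PySem.Int.mod x (2 ^ s)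
    let half := (2 : Int) ^ (s - 1)
    let m := if half < r ∨ (r = half ∧ PySem.Int.mod q 2 = 1) then q + 1 else q;
    -(PySem.Int.floordiv (-(m * 2 ^ s)) 64)

def stable_array_rsc (data_width : Int) (array_size : Int) (resource_type : Option String) : List (String × Int) :=
  let resource_type := if data_width * array_size ≥ 1024 then some "BRAM" else resource_type
  let array_bram : Int := 0
  let array_lut : Int := 0
  if resource_type = some "BRAM" then
    let max_bram_depth := bram18k_depth (min data_width 36)
    -- math.ceil(data_width/36): exact for |data_width| ≤ 2^31, ported as -((-data_width) // 36)
    let array_bram := -(PySem.Int.floordiv (-data_width) 36)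
    let array_bram := pvALoop max_bram_depth (bram18k_depth_pos _) array_size array_bram
    [("LUT", array_lut), ("BRAM", array_bram), ("DSP", 0), ("FF", 0)]
  else
    -- math.ceil(data_width*array_size/64) through float division, see pvFloatCeilDiv64
    let array_lut := pvFloatCeilDiv64 (data_width * array_size)
    [("LUT", array_lut), ("BRAM", array_bram), ("DSP", 0), ("FF", 0)]

-- ===== PORT B =====
def stable_array_rsc_alt (data_width : Int) (array_size : Int) (resource_type : Option String) : List (String × Int) :=
  let resource_type := if data_width * array_size ≥ 1024 then some "BRAM" else resource_type
  if resource_type = some "BRAM" then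
    let w := min data_width 36
    let max_bram_depth : Int :=
      if w = 1 then 16384
      else if w = 2 then 8192
      else if w ≤ 4 then 4096
      else if w ≤ 9 then 2048
      else if w ≤ 18 then 1024
      else 512
    -- closed form for the repeated ceil-halving: smallest k with array_size ≤ max_bram_depth * 2^k
    let m := -(PySem.Int.floordiv (-array_size) max_bram_depth)
    let k : Nat := if m ≤ 1 then 0 else PySem.Int.bitLength (m - 1)
    let array_bram := -(PySem.Int.floordiv (-data_width) 36) * 2 ^ k
    [("LUT", 0), ("BRAM", array_bram), ("DSP", 0), ("FF", 0)]
  else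
    let array_lut := -(PySem.Int.floordiv (-(data_width * array_size)) 64)
    [("LUT", array_lut), ("BRAM", 0), ("DSP", 0), ("FF", 0)]

-- ===== PRECONDITION & SPEC =====
-- Pre_ excludes inputs whose product data_width*array_size is -2^53 or below: there A's
-- math.ceil(data_width*array_size/64) goes through IEEE-754 float division whose round-to-even
-- can differ from the exact integer ceiling, so A's value is a float-rounding artifact no exact
-- integer reimplementation should match.
def Pre_stable_array_rsc (data_width : Int) (array_size : Int) (resource_type : Option String) : Prop :=
  -(2 ^ 53) < data_width * array_size
instance (data_width : Int) (array_size : Int) (resource_type : Option String) : Decidable (Pre_stable_array_rsc data_width array_size resource_type) := by unfold Pre_stable_array_rsc; infer_instance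

def pvWitness_stable_array_rsc : Int × Int × Option String := (16, 2048, none)

def Spec_stable_array_rsc (data_width : Int) (array_size : Int) (resource_type : Option String) (out : List (String × Int)) : Prop := out = stable_array_rsc_alt data_width array_size resource_type
instance (data_width : Int) (array_size : Int) (resource_type : Option String) (out : List (String × Int)) : Decidable (Spec_stable_array_rsc data_width array_size resource_type out) := by unfold Spec_stable_array_rsc; infer_instance

-- ===== CLAIM (what is proved, stated in full; the proofs are below) =====
def Claim_equal_stable_array_rsc : Prop := ∀ (data_width : Int) (array_size : Int) (resource_type : Option String), Dom_stable_array_rsc data_width array_size resource_type → Pre_stable_array_rsc data_width array_size resource_type → Spec_stable_array_rsc data_width array_size resource_type (stable_array_rsc data_width array_size resource_type)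


-- ===== LEMMAS AND PROOFS =====

-- Python's n.bit_length() bracket: bitLength n ≤ j ↔ n < 2^j, for 0 ≤ n
theorem pvBitLength_le_iff (n : Int) (j : Nat) (hn : 0 ≤ n) :
    PySem.Int.bitLength n ≤ j ↔ n < (2 : Int) ^ j := by
  constructor
  · intro h
    have h1 := PySem.Int.lt_two_pow_bitLength n
    have h2 : (2 : Nat) ^ PySem.Int.bitLength n ≤ 2 ^ j := Nat.pow_le_pow_right (by norm_num) h
    have h3 : n.natAbs < 2 ^ j := lt_of_lt_of_le h1 h2
    have h4 : ((n.natAbs : Int)) < (((2 ^ j : Nat) : Int)) := by exact_mod_cast h3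
    rw [Int.natAbs_of_nonneg hn] at h4
    push_cast at h4
    exact h4
  · intro h
    by_cases h0 : n = 0
    · simp [h0, PySem.Int.bitLength_zero]
    · by_contra hj
      have hj2 : j < PySem.Int.bitLength n := by omega
      clear hj
      have h1 := PySem.Int.two_pow_bitLength_le n h0
      have h2 : (2 : Nat) ^ j ≤ 2 ^ (PySem.Int.bitLength n - 1) :=
        Nat.pow_le_pow_right (by norm_num) (by omega)
      have h3 : (2 : Nat) ^ j ≤ n.natAbs := le_trans h2 h1
      have h4 : (((2 ^ j : Nat) : Int)) ≤ ((n.natAbs : Int)) := by exact_mod_cast h3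
      rw [Int.natAbs_of_nonneg hn] at h4
      push_cast at h4
      omega

-- |x| < 2^53 bounds Python's x.bit_length() by 53
theorem pvSmallBitLength (x : Int) (h1 : -(2 ^ 53) < x) (h2 : x < 2 ^ 53) :
    PySem.Int.bitLength x ≤ 53 := by
  rcases le_or_gt 0 x with hx | hx
  · exact (pvBitLength_le_iff x 53 hx).mpr (by norm_num; omega)
  · rw [← PySem.Int.bitLength_neg]
    exact (pvBitLength_le_iff (-x) 53 (by omega)).mpr (by norm_num; omega)

-- inside Pre_, the float path of A's LUT ceiling is the exact integer ceiling
theorem pvFloatCeil_exact (x : Int) (h : PySem.Int.bitLength x ≤ 53) :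
    pvFloatCeilDiv64 x = -(PySem.Int.floordiv (-x) 64) := by
  unfold pvFloatCeilDiv64
  rw [if_pos h]

-- the ceiling division -((-a)//d) bracket (for 0 < d): -((-a)//d) ≤ q ↔ a ≤ q*d
theorem pvCeilDiv_le_iff (a d q : Int) (hd : 0 < d) :
    -(PySem.Int.floordiv (-a) d) ≤ q ↔ a ≤ q * d := by
  rw [PySem.Int.floordiv_eq_ediv_of_pos hd, neg_le, Int.le_ediv_iff_mul_le hd, neg_mul]
  constructor <;> intro h <;> linarith

-- B's exponent k(a) is the least k with a ≤ d * 2^k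
theorem pvChar (d a : Int) (hd : 0 < d) (j : Nat) :
    a ≤ d * 2 ^ j ↔ (if -(PySem.Int.floordiv (-a) d) ≤ 1 then 0
                     else PySem.Int.bitLength (-(PySem.Int.floordiv (-a) d) - 1)) ≤ j := by
  split_ifs with hm
  · simp only [Nat.zero_le, iff_true]
    have ha : a ≤ 1 * d := (pvCeilDiv_le_iff a d 1 hd).mp hm
    have h2 : (1 : Int) ≤ 2 ^ j := one_le_pow₀ (by norm_num)
    nlinarith
  · rw [pvBitLength_le_iff _ _ (by omega), mul_comm, ← pvCeilDiv_le_iff a d _ hd]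
    omega

-- linking one ceil-halving step: ceil(a/2) ≤ d*2^j ↔ a ≤ d*2^(j+1)
theorem pvHalfStep (a d : Int) (j : Nat) :
    -(PySem.Int.floordiv (-a) 2) ≤ d * 2 ^ j ↔ a ≤ d * 2 ^ (j + 1) := by
  rw [pvCeilDiv_le_iff a 2 (d * 2 ^ j) (by norm_num), pow_succ]
  constructor <;> intro h <;> linarith

-- the while loop equals B's closed form
theorem pvLoop_eq (d : Int) (hd : 0 < d) (as bram : Int) :
    pvALoop d hd as bram =
      bram * 2 ^ (if -(PySem.Int.floordiv (-as) d) ≤ 1 then 0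
                  else PySem.Int.bitLength (-(PySem.Int.floordiv (-as) d) - 1)) := by
  fun_induction pvALoop d hd as bram with
  | case1 as bram h ih =>
    rw [ih]
    set as' := -(PySem.Int.floordiv (-as) 2) with has'
    set kA := (if -(PySem.Int.floordiv (-as) d) ≤ 1 then 0
               else PySem.Int.bitLength (-(PySem.Int.floordiv (-as) d) - 1)) with hkA
    set kB := (if -(PySem.Int.floordiv (-as') d) ≤ 1 then 0
               else PySem.Int.bitLength (-(PySem.Int.floordiv (-as') d) - 1)) with hkB
    have hA := fun j => pvChar d as hd j
    have hB := fun j => pvChar d as' hd j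
    have hAk : as ≤ d * 2 ^ kA := (hA kA).mpr le_rfl
    have hBk : as' ≤ d * 2 ^ kB := (hB kB).mpr le_rfl
    have hA1 : 1 ≤ kA := by
      by_contra hc
      have hk0 : kA = 0 := by omega
      have := (hA 0).mpr (by omega)
      simp at this
      omega
    have h1 : kA ≤ kB + 1 := (hA (kB + 1)).mp ((pvHalfStep as d kB).mp hBk)
    have h2 : kB ≤ kA - 1 := (hB (kA - 1)).mp (by
      rw [pvHalfStep as d (kA - 1)]
      have : kA - 1 + 1 = kA := by omega
      rw [this]; exact hAk)
    have hk : kA = kB + 1 := by omega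
    rw [hk, pow_succ]
    ring
  | case2 as bram h =>
    have hm : -(PySem.Int.floordiv (-as) d) ≤ 1 := by
      rw [pvCeilDiv_le_iff as d 1 hd]
      linarith
    rw [if_pos hm]
    simp

-- ===== VERDICT (by name: the statement is the Claim_ definition above) =====
theorem stable_array_rsc_spec : Claim_equal_stable_array_rsc := by
  intro dw as rt _ hpre
  unfold Pre_stable_array_rsc at hpre
  unfold Spec_stable_array_rsc stable_array_rsc stable_array_rsc_alt bram18k_depth
  dsimp only
  split_ifs with h1 <;>
    first
      | rw [pvLoop_eq]
      | rw [pvFloatCeil_exact (dw * as) (pvSmallBitLength _ hpre (by omega))]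
      | (exact absurd rfl (by assumption))
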